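-- pv_equiv track=rewrite | github.com/kkuntner/advent-of-code-2024 | 10/ten.py | search
-- ===== SOURCE A (Python) =====
-- def search(map, number, countermap):
--
--         newcountermap = [[0 for x in range(len(map[0]))] for y in range(len(map))]
--
--         for y in range(0, len(map)):
--             for x in range(0, len(map[y])):
--                 if map[y][x] == number:
--                     sum = 0
--                     if number == 9:
--                         sum = 1
--                     else:
--                         # see if above exists, and it is a number+1
--                         # if yes, add countermap's same position to up
--                         if y > 0 and map[y-1][x] == number+1:
--                             sum += countermap[y-1][x]
--                         # see if below exists, and it is a number+1
--                         # if yes, add countermap's same position to up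
--                         if y < len(map)-1 and map[y+1][x] == number+1:
--                             sum += countermap[y+1][x]
--                         # see if left exists, and it is a number+1
--                         # if yes, add countermap's same position to up
--                         if x > 0 and map[y][x-1] == number+1:
--                             sum += countermap[y][x-1]
--                         # see if right exists, and it is a number+1
--                         # if yes, add countermap's same position to up
--                         if x < len(map[y])-1 and map[y][x+1] == number+1:
--                             sum += countermap[y][x+1]
--
--                     newcountermap[y][x] = sum
--         return newcountermap
-- ===== SOURCE B (Python) =====
-- def search(map, number, countermap):
--     # scatter/push: instead of each number-cell pulling from its four neighbours,
--     # every (number+1)-cell pushes its counter value into adjacent number-cells.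
--     h = len(map)
--     w = len(map[0])
--     new = [[0] * w for _ in range(h)]
--     if number == 9:
--         return [[1 if v == 9 else 0 for v in row] for row in map]
--     for y in range(h):
--         for x in range(w):
--             if map[y][x] == number + 1:
--                 v = countermap[y][x]
--                 for ny, nx in ((y - 1, x), (y + 1, x), (y, x - 1), (y, x + 1)):
--                     if 0 <= ny < h and 0 <= nx < w and map[ny][nx] == number:
--                         new[ny][nx] += v
--     return new
-- ===== Notes on version B (the rewrite author's own statement) =====
-- stated objective: alternative
-- what changed: B reverses the data flow: instead of A's gather, where each cell holding number reads its four neighbours and pulls their counters when they hold number+1, B scans the SOURCE layer (cells holding number+1) and pushes each one's counter value into every in-bounds orthogonal neighbour that holds number (scatter into an accumulator grid), with a direct comprehension for the number==9 base layer.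
-- outside the precondition, e.g. on search([[1, 1], [1]], 0, [[0, 0], [0, 0]]): A returns [[0, 0], [0, 0]], B raises IndexError; on search([[9]], 9, []): A returns [[1]], B returns [[1]]
import Mathlib
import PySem

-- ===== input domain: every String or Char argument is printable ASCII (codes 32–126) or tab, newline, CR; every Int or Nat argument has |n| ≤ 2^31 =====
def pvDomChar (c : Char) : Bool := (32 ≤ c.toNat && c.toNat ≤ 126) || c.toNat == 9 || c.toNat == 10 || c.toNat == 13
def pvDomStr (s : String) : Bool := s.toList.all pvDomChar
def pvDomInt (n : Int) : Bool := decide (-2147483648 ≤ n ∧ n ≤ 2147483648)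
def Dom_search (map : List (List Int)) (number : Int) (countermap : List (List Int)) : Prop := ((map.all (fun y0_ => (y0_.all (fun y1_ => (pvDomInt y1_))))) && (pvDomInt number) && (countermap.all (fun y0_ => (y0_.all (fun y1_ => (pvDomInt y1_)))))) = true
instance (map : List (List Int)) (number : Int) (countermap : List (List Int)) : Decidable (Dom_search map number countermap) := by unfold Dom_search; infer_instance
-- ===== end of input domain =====

-- B replaces A's neighbour-gather (each number-cell pulls counters from number+1 neighbours)
-- by a scatter: each number+1 source cell pushes its counter into adjacent number-cells; objective: alternative.


-- ===== PORT A =====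
-- the four guarded '+=' accumulations of A's else-branch (nested lets mirror the statement sequence)
def sumA (map : List (List Int)) (countermap : List (List Int)) (number : Int) (y : Int) (x : Int) : Int :=
  let s : Int := 0
  let s := if 0 < y ∧ PySem.List.pyGetD (PySem.List.pyGetD map (y - 1) []) x 0 = number + 1 then
             s + PySem.List.pyGetD (PySem.List.pyGetD countermap (y - 1) []) x 0 else s
  let s := if y < (map.length : Int) - 1 ∧ PySem.List.pyGetD (PySem.List.pyGetD map (y + 1) []) x 0 = number + 1 then
             s + PySem.List.pyGetD (PySem.List.pyGetD countermap (y + 1) []) x 0 else s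
  let s := if 0 < x ∧ PySem.List.pyGetD (PySem.List.pyGetD map y []) (x - 1) 0 = number + 1 then
             s + PySem.List.pyGetD (PySem.List.pyGetD countermap y []) (x - 1) 0 else s
  let s := if x < ((PySem.List.pyGetD map y []).length : Int) - 1 ∧ PySem.List.pyGetD (PySem.List.pyGetD map y []) (x + 1) 0 = number + 1 then
             s + PySem.List.pyGetD (PySem.List.pyGetD countermap y []) (x + 1) 0 else s
  s

-- body of A's inner x-loop ('newcountermap[y][x] = sum' when map[y][x] == number); indices come from
-- range(...) so they are nonnegative and in range under Pre_, where pyGetD/pySetD are exact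
def bodyA (map : List (List Int)) (number : Int) (countermap : List (List Int)) (y : Int)
    (nc : List (List Int)) (x : Int) : List (List Int) :=
  if PySem.List.pyGetD (PySem.List.pyGetD map y []) x 0 = number then
    let s : Int := if number = 9 then 1 else sumA map countermap number y x
    PySem.List.pySetD nc y (PySem.List.pySetD (PySem.List.pyGetD nc y []) x s)
  else nc

def search (map : List (List Int)) (number : Int) (countermap : List (List Int)) : List (List Int) :=
  let newcountermap := (PySem.List.pyRange 0 (map.length : Int) 1).map
    (fun _ => (PySem.List.pyRange 0 ((PySem.List.pyGetD map 0 []).length : Int) 1).map (fun _ => (0 : Int)))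
  (PySem.List.pyRange 0 (map.length : Int) 1).foldl
    (fun nc y => (PySem.List.pyRange 0 ((PySem.List.pyGetD map y []).length : Int) 1).foldl
      (bodyA map number countermap y) nc)
    newcountermap

-- ===== PORT B =====
-- 'if 0 <= ny < h and 0 <= nx < w and map[ny][nx] == number: new[ny][nx] += v'
def addNbr (map : List (List Int)) (number : Int) (h w : Int) (v : Int)
    (g : List (List Int)) (ny nx : Int) : List (List Int) :=
  if 0 ≤ ny ∧ ny < h ∧ 0 ≤ nx ∧ nx < w ∧
      PySem.List.pyGetD (PySem.List.pyGetD map ny []) nx 0 = number then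
    PySem.List.pySetD g ny (PySem.List.pySetD (PySem.List.pyGetD g ny []) nx
      (PySem.List.pyGetD (PySem.List.pyGetD g ny []) nx 0 + v))
  else g

-- body of B's inner x-loop: a number+1 source cell pushes its counter into the four neighbours
def bodyB (map : List (List Int)) (number : Int) (countermap : List (List Int)) (h w : Int)
    (y : Int) (g : List (List Int)) (x : Int) : List (List Int) :=
  if PySem.List.pyGetD (PySem.List.pyGetD map y []) x 0 = number + 1 then
    let v := PySem.List.pyGetD (PySem.List.pyGetD countermap y []) x 0
    [((y - 1, x) : Int × Int), (y + 1, x), (y, x - 1), (y, x + 1)].foldl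
      (fun g p => addNbr map number h w v g p.1 p.2) g
  else g

def search_alt (map : List (List Int)) (number : Int) (countermap : List (List Int)) : List (List Int) :=
  let h : Int := (map.length : Int)
  let w : Int := ((PySem.List.pyGetD map 0 []).length : Int)
  let new := (PySem.List.pyRange 0 h 1).map (fun _ => List.replicate w.toNat (0 : Int))
  if number = 9 then
    map.map (fun row => row.map (fun v => if v = 9 then (1 : Int) else 0))
  else
    (PySem.List.pyRange 0 h 1).foldl
      (fun g y => (PySem.List.pyRange 0 w 1).foldl (bodyB map number countermap h w y) g) new

-- ===== PRECONDITION & SPEC =====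
-- Pre_ excludes the empty map, non-rectangular maps and countermaps not shaped like the map: on most such
-- inputs A raises IndexError, and where it still returns, the result shape is an accident of which cells match.
def Pre_search (map : List (List Int)) (number : Int) (countermap : List (List Int)) : Prop :=
  map ≠ [] ∧ (∀ r ∈ map, r.length = (map.getD 0 []).length) ∧
    countermap.length = map.length ∧ (∀ r ∈ countermap, r.length = (map.getD 0 []).length)
instance (map : List (List Int)) (number : Int) (countermap : List (List Int)) : Decidable (Pre_search map number countermap) := by unfold Pre_search; infer_instance

def pvWitness_search : List (List Int) × Int × List (List Int) :=
  ([[0, 1], [1, 2]], 0, [[0, 0], [1, 1]])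

def Spec_search (map : List (List Int)) (number : Int) (countermap : List (List Int)) (out : List (List Int)) : Prop := out = search_alt map number countermap
instance (map : List (List Int)) (number : Int) (countermap : List (List Int)) (out : List (List Int)) : Decidable (Spec_search map number countermap out) := by unfold Spec_search; infer_instance

-- ===== CLAIM (what is proved, stated in full; the proofs are below) =====
def Claim_equal_search : Prop := ∀ (map : List (List Int)) (number : Int) (countermap : List (List Int)), Dom_search map number countermap → Pre_search map number countermap → Spec_search map number countermap (search map number countermap)

-- ===== LEMMAS AND PROOFS =====

-- value of cell (y, x) of a grid (proof-side abbreviation)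
def mAt (g : List (List Int)) (y x : Nat) : Int := (g.getD y []).getD x 0

-- the common pointwise value both programs compute at cell (y, x)
def cellA (map : List (List Int)) (number : Int) (countermap : List (List Int)) (y x : Nat) : Int :=
  if mAt map y x = number then
    (if number = 9 then 1 else sumA map countermap number (y : Int) (x : Int))
  else 0

lemma getD_set' {α : Type} (l : List α) (n m : Nat) (a d : α) :
    (l.set n a).getD m d = if m = n ∧ n < l.length then a else l.getD m d := by
  simp only [List.getD_eq_getElem?_getD, List.getElem?_set]
  by_cases hmn : n = m
  · subst hmn
    by_cases hn : n < l.length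
    · simp [hn]
    · simp [hn, List.getElem?_eq_none (Nat.le_of_not_lt hn)]
  · rw [if_neg hmn, if_neg (by rintro ⟨h, -⟩; exact hmn h.symm)]

lemma pySetD_nil (x : Int) (v : Int) : PySem.List.pySetD ([] : List Int) x v = [] := by
  simp only [PySem.List.pySetD, PySem.List.pySet?, List.set_nil]
  cases h : PySem.List.pyIdx? ([] : List Int).length x <;> simp [h]

lemma sumA_gen (map countermap : List (List Int)) (number y x : Int) :
    sumA map countermap number y x =
      (if 0 < y ∧ PySem.List.pyGetD (PySem.List.pyGetD map (y - 1) []) x 0 = number + 1 then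
         PySem.List.pyGetD (PySem.List.pyGetD countermap (y - 1) []) x 0 else 0) +
      (if y < (map.length : Int) - 1 ∧ PySem.List.pyGetD (PySem.List.pyGetD map (y + 1) []) x 0 = number + 1 then
         PySem.List.pyGetD (PySem.List.pyGetD countermap (y + 1) []) x 0 else 0) +
      (if 0 < x ∧ PySem.List.pyGetD (PySem.List.pyGetD map y []) (x - 1) 0 = number + 1 then
         PySem.List.pyGetD (PySem.List.pyGetD countermap y []) (x - 1) 0 else 0) +
      (if x < ((PySem.List.pyGetD map y []).length : Int) - 1 ∧ PySem.List.pyGetD (PySem.List.pyGetD map y []) (x + 1) 0 = number + 1 then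
         PySem.List.pyGetD (PySem.List.pyGetD countermap y []) (x + 1) 0 else 0) := by
  unfold sumA
  dsimp only
  split_ifs <;> ring

-- step of A's inner loop acting on the single row it mutates
def rowStepA (map : List (List Int)) (number : Int) (countermap : List (List Int)) (y : Nat)
    (r : List Int) (x : Int) : List Int :=
  if PySem.List.pyGetD (PySem.List.pyGetD map (y : Int) []) x 0 = number then
    PySem.List.pySetD r x (if number = 9 then 1 else sumA map countermap number (y : Int) x)
  else r

lemma foldl_bodyA_char (map : List (List Int)) (number : Int) (countermap : List (List Int))
    (y : Nat) (xs : List Int) : ∀ nc : List (List Int),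
      ((xs.foldl (bodyA map number countermap (y : Int)) nc).length = nc.length) ∧
      (∀ j : Nat, (xs.foldl (bodyA map number countermap (y : Int)) nc).getD j [] =
        if j = y then xs.foldl (rowStepA map number countermap y) (nc.getD y []) else nc.getD j []) := by
  induction xs with
  | nil => intro nc; simp
  | cons x xs ih =>
    intro nc
    have hlen : (bodyA map number countermap (y : Int) nc x).length = nc.length := by
      unfold bodyA
      by_cases hc : PySem.List.pyGetD (PySem.List.pyGetD map (y : Int) []) x 0 = number
      · rw [if_pos hc]
        show (PySem.List.pySetD nc (y : Int) _).length = nc.length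
        simp [PySem.List.pySetD_natCast]
      · rw [if_neg hc]
    have hget : ∀ j : Nat, (bodyA map number countermap (y : Int) nc x).getD j [] =
        if j = y then rowStepA map number countermap y (nc.getD y []) x else nc.getD j [] := by
      intro j
      by_cases hc : PySem.List.pyGetD (PySem.List.pyGetD map (y : Int) []) x 0 = number
      · rw [bodyA, if_pos hc, rowStepA, if_pos hc]
        show (PySem.List.pySetD nc (y : Int)
          (PySem.List.pySetD (PySem.List.pyGetD nc (y : Int) []) x
            (if number = 9 then 1 else sumA map countermap number (y : Int) x))).getD j [] = _
        simp only [PySem.List.pySetD_natCast, PySem.List.pyGetD_natCast]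
        rw [getD_set']
        by_cases hj : j = y
        · subst hj
          by_cases hy : j < nc.length
          · rw [if_pos ⟨rfl, hy⟩, if_pos rfl]
          · rw [if_neg (by tauto), if_pos rfl]
            have h0 : nc.getD j [] = [] := List.getD_eq_default _ _ (by omega)
            rw [h0, pySetD_nil]
        · rw [if_neg (by tauto), if_neg hj]
      · rw [bodyA, if_neg hc, rowStepA, if_neg hc]
        by_cases hj : j = y
        · subst hj; rw [if_pos rfl]
        · rw [if_neg hj]
    obtain ⟨l, g⟩ := ih (bodyA map number countermap (y : Int) nc x)
    refine ⟨by rw [List.foldl_cons, l, hlen], ?_⟩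
    intro j
    by_cases hj : j = y
    · subst hj
      rw [List.foldl_cons, g j, if_pos rfl, hget j, if_pos rfl, if_pos rfl, List.foldl_cons]
    · rw [List.foldl_cons, g j, if_neg hj, hget j, if_neg hj, if_neg hj]

-- step of A's inner loop over Nat indices
def rstep (map : List (List Int)) (number : Int) (countermap : List (List Int)) (y : Nat)
    (r : List Int) (k : Nat) : List Int :=
  if mAt map y k = number then
    r.set k (if number = 9 then 1 else sumA map countermap number (y : Int) (k : Int))
  else r

lemma rowStepA_cast (map : List (List Int)) (number : Int) (countermap : List (List Int)) (y : Nat) :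
    (fun (r : List Int) (k : Nat) => rowStepA map number countermap y r (k : Int)) =
      rstep map number countermap y := by
  funext r k
  simp [rowStepA, rstep, mAt, PySem.List.pyGetD_natCast, PySem.List.pySetD_natCast]

lemma rowfold_char (map : List (List Int)) (number : Int) (countermap : List (List Int)) (y : Nat) :
    ∀ (n : Nat) (r : List Int),
      (((List.range n).foldl (rstep map number countermap y) r).length = r.length) ∧
      (∀ j : Nat, ((List.range n).foldl (rstep map number countermap y) r).getD j 0 =
        if j < n ∧ mAt map y j = number ∧ j < r.length then
          (if number = 9 then 1 else sumA map countermap number (y : Int) (j : Int))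
        else r.getD j 0) := by
  intro n
  induction n with
  | zero => intro r; simp
  | succ n ih =>
    intro r
    obtain ⟨l, g⟩ := ih r
    rw [List.range_succ]
    have hstep_len : ∀ s : List Int, (rstep map number countermap y s n).length = s.length := by
      intro s
      unfold rstep
      by_cases h : mAt map y n = number
      · rw [if_pos h, List.length_set]
      · rw [if_neg h]
    refine ⟨?_, ?_⟩
    · rw [List.foldl_append, List.foldl_cons, List.foldl_nil, hstep_len, l]
    · intro j
      rw [List.foldl_append, List.foldl_cons, List.foldl_nil]
      by_cases hc : mAt map y n = number
      · rw [rstep, if_pos hc, getD_set', l, g j]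
        by_cases hj : j = n
        · subst hj
          by_cases hr : j < r.length
          · simp [hr, hc]
          · simp [hr]
        · by_cases h2 : j < n ∧ mAt map y j = number ∧ j < r.length
          · simp [hj, h2.1, h2.2.1, h2.2.2, Nat.lt_succ_of_lt h2.1]
          · have h3 : ¬ (j < n + 1 ∧ mAt map y j = number ∧ j < r.length) := by
              rintro ⟨a, b, c⟩; exact h2 ⟨by omega, b, c⟩
            rw [if_neg (show ¬ (j = n ∧ n < r.length) by tauto), if_neg h2, if_neg h3]
      · rw [rstep, if_neg hc, g j]
        by_cases h2 : j < n ∧ mAt map y j = number ∧ j < r.length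
        · simp [h2.1, h2.2.1, h2.2.2, Nat.lt_succ_of_lt h2.1]
        · have h3 : ¬ (j < n + 1 ∧ mAt map y j = number ∧ j < r.length) := by
            rintro ⟨a, b, c⟩
            rcases Nat.lt_succ_iff_lt_or_eq.mp a with h | h
            · exact h2 ⟨h, b, c⟩
            · subst h; exact hc b
          rw [if_neg h2, if_neg h3]

-- step of A's outer loop over Nat row indices
def ostep (map : List (List Int)) (number : Int) (countermap : List (List Int))
    (nc : List (List Int)) (k : Nat) : List (List Int) :=
  (PySem.List.pyRange 0 (((map.getD k []).length : Nat) : Int) 1).foldl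
    (bodyA map number countermap (k : Int)) nc

-- result of A's inner loop on row j, started from row r
def rowRes (map : List (List Int)) (number : Int) (countermap : List (List Int)) (j : Nat)
    (r : List Int) : List Int :=
  (PySem.List.pyRange 0 (((map.getD j []).length : Nat) : Int) 1).foldl
    (rowStepA map number countermap j) r

lemma ofold_char (map : List (List Int)) (number : Int) (countermap : List (List Int)) :
    ∀ (n : Nat) (g0 : List (List Int)),
      (((List.range n).foldl (ostep map number countermap) g0).length = g0.length) ∧
      (∀ j : Nat, ((List.range n).foldl (ostep map number countermap) g0).getD j [] =
        if j < n then rowRes map number countermap j (g0.getD j []) else g0.getD j []) := by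
  intro n
  induction n with
  | zero => intro g0; simp
  | succ n ih =>
    intro g0
    obtain ⟨l, g⟩ := ih g0
    rw [List.range_succ]
    obtain ⟨bl, bg⟩ := foldl_bodyA_char map number countermap n
      (PySem.List.pyRange 0 (((map.getD n []).length : Nat) : Int) 1)
      ((List.range n).foldl (ostep map number countermap) g0)
    refine ⟨?_, ?_⟩
    · rw [List.foldl_append, List.foldl_cons, List.foldl_nil]
      show (ostep map number countermap _ n).length = g0.length
      rw [ostep, bl, l]
    · intro j
      rw [List.foldl_append, List.foldl_cons, List.foldl_nil]
      show (ostep map number countermap _ n).getD j [] = _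
      rw [ostep, bg j]
      by_cases hj : j = n
      · subst hj
        rw [if_pos rfl, g j, if_neg (by omega), if_pos (by omega), rowRes]
      · rw [if_neg hj, g j]
        by_cases h2 : j < n
        · rw [if_pos h2, if_pos (by omega)]
        · rw [if_neg h2, if_neg (by omega)]

lemma getD_map_const {α β : Type} (l : List α) (z : β) (y : Nat) (d : β) :
    ((l.map fun _ => z).getD y d) = if y < l.length then z else d := by
  by_cases h : y < l.length
  · rw [if_pos h, List.getD_eq_getElem _ _ (by simpa using h), List.getElem_map]
  · rw [if_neg h, List.getD_eq_default _ _ (by simpa using Nat.le_of_not_lt h)]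

lemma getD_replicate0 (w x : Nat) : (List.replicate w (0 : Int)).getD x 0 = 0 := by
  by_cases h : x < w
  · rw [List.getD_eq_getElem _ _ (by simpa using h), List.getElem_replicate]
  · rw [List.getD_eq_default _ _ (by simpa using Nat.le_of_not_lt h)]

-- A's fresh zero row, as a replicate
lemma zrow_eq (w : Nat) :
    (PySem.List.pyRange 0 (w : Int) 1).map (fun _ => (0 : Int)) = List.replicate w 0 := by
  refine List.eq_replicate_iff.mpr ⟨?_, ?_⟩
  · simp [PySem.List.length_pyRange_one]
  · intro b hb
    simp only [List.mem_map] at hb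
    obtain ⟨a, -, rfl⟩ := hb
    rfl

-- unfolded form of A as the Nat-indexed double fold
lemma search_eq_fold (map : List (List Int)) (number : Int) (countermap : List (List Int)) :
    search map number countermap =
      (List.range map.length).foldl (ostep map number countermap)
        ((List.range map.length).map
          (fun _ => List.replicate (map.getD 0 []).length (0 : Int))) := by
  unfold search
  simp only [PySem.List.pyGetD_zero]
  rw [zrow_eq]
  rw [PySem.List.pyRange_one]
  simp only [sub_zero, Int.toNat_natCast, zero_add, List.foldl_map, List.map_map,
    Function.comp_def]
  have hfun : (fun (nc : List (List Int)) (k : Nat) =>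
      (PySem.List.pyRange 0 (((PySem.List.pyGetD map (k : Int) []).length : Nat) : Int) 1).foldl
        (bodyA map number countermap (k : Int)) nc) = ostep map number countermap := by
    funext nc k
    rw [ostep, PySem.List.pyGetD_natCast]
  rw [hfun]

lemma lenA (map : List (List Int)) (number : Int) (countermap : List (List Int)) :
    (search map number countermap).length = map.length := by
  rw [search_eq_fold, (ofold_char map number countermap map.length _).1]
  simp

lemma rowRes_char (map : List (List Int)) (number : Int) (countermap : List (List Int))
    (j : Nat) (r : List Int) :
    (rowRes map number countermap j r).length = r.length ∧
    (∀ x : Nat, (rowRes map number countermap j r).getD x 0 =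
      if x < (map.getD j []).length ∧ mAt map j x = number ∧ x < r.length then
        (if number = 9 then 1 else sumA map countermap number (j : Int) (x : Int))
      else r.getD x 0) := by
  have heq : rowRes map number countermap j r =
      (List.range (map.getD j []).length).foldl (rstep map number countermap j) r := by
    rw [rowRes, PySem.List.pyRange_one]
    simp only [sub_zero, Int.toNat_natCast, zero_add, List.foldl_map]
    rw [rowStepA_cast]
  rw [heq]
  exact ⟨(rowfold_char map number countermap j _ r).1,
    fun x => (rowfold_char map number countermap j _ r).2 x⟩

lemma rowlenA (map : List (List Int)) (number : Int) (countermap : List (List Int)) (y : Nat) :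
    ((search map number countermap).getD y []).length =
      (if y < map.length then (map.getD 0 []).length else 0) := by
  rw [search_eq_fold, (ofold_char map number countermap map.length _).2 y]
  by_cases hy : y < map.length
  · rw [if_pos hy, if_pos hy, (rowRes_char map number countermap y _).1,
      getD_map_const, List.length_range, if_pos hy, List.length_replicate]
  · rw [if_neg hy, if_neg hy, getD_map_const, List.length_range, if_neg hy]
    rfl

lemma entryA (map : List (List Int)) (number : Int) (countermap : List (List Int))
    (hp : Pre_search map number countermap) (y x : Nat) (hy : y < map.length)
    (hx : x < (map.getD 0 []).length) :
    ((search map number countermap).getD y []).getD x 0 = cellA map number countermap y x := by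
  have hrow : (map.getD y []).length = (map.getD 0 []).length := by
    apply hp.2.1
    rw [List.getD_eq_getElem _ _ hy]
    exact List.getElem_mem hy
  rw [search_eq_fold, (ofold_char map number countermap map.length _).2 y, if_pos hy,
    getD_map_const, List.length_range, if_pos hy,
    (rowRes_char map number countermap y _).2 x, List.length_replicate, hrow,
    getD_replicate0]
  unfold cellA
  by_cases hm : mAt map y x = number
  · have hcond : x < (map.getD 0 []).length ∧ mAt map y x = number ∧ x < (map.getD 0 []).length :=
      ⟨hx, hm, hx⟩
    rw [if_pos hcond, if_pos hm]
  · have hcond : ¬ (x < (map.getD 0 []).length ∧ mAt map y x = number ∧ x < (map.getD 0 []).length) := by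
      tauto
    rw [if_neg hcond, if_neg hm]

-- ===== B-side lemmas =====

-- grid shape: exactly H rows, every row of width W
def Shp (g : List (List Int)) (H W : Nat) : Prop := g.length = H ∧ ∀ r ∈ g, r.length = W

-- one scatter step changes exactly one entry, by +v, when its guard names a number-cell
lemma addNbr_char (map : List (List Int)) (number : Int) (H W : Nat) (v : Int)
    (g : List (List Int)) (hs : Shp g H W) (ny nx : Int) :
    Shp (addNbr map number (H : Int) (W : Int) v g ny nx) H W ∧
    ∀ j i : Nat, j < H → i < W →
      mAt (addNbr map number (H : Int) (W : Int) v g ny nx) j i =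
        mAt g j i + (if ny = (j : Int) ∧ nx = (i : Int) ∧ mAt map j i = number then v else 0) := by
  obtain ⟨hg, hrows⟩ := hs
  unfold addNbr
  by_cases hc : 0 ≤ ny ∧ ny < (H : Int) ∧ 0 ≤ nx ∧ nx < (W : Int) ∧
      PySem.List.pyGetD (PySem.List.pyGetD map ny []) nx 0 = number
  · rw [if_pos hc]
    obtain ⟨h1, h2, h3, h4, h5⟩ := hc
    lift ny to ℕ using h1 with a
    lift nx to ℕ using h3 with b
    have ha : a < H := by exact_mod_cast h2
    have hb : b < W := by exact_mod_cast h4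
    have hag : a < g.length := by omega
    have hrow : (g.getD a []).length = W := by
      apply hrows
      rw [List.getD_eq_getElem _ _ hag]
      exact List.getElem_mem hag
    have h5' : mAt map a b = number := by
      simpa [PySem.List.pyGetD_natCast, mAt] using h5
    simp only [PySem.List.pySetD_natCast, PySem.List.pyGetD_natCast]
    constructor
    · constructor
      · rw [List.length_set, hg]
      · intro r hr
        rcases List.mem_or_eq_of_mem_set hr with h | h
        · exact hrows r h
        · subst h
          rw [List.length_set, hrow]
    · intro j i hj hi
      rw [mAt, getD_set']
      by_cases hja : j = a
      · subst hja
        rw [if_pos ⟨rfl, hag⟩, getD_set']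
        by_cases hib : i = b
        · subst hib
          rw [if_pos ⟨rfl, by omega⟩, if_pos ⟨rfl, rfl, h5'⟩]
          rfl
        · rw [if_neg (by tauto), if_neg (by rintro ⟨-, hbi, -⟩; exact hib (by exact_mod_cast hbi.symm)), add_zero]
          rfl
      · rw [if_neg (by tauto), if_neg (by rintro ⟨haj, -, -⟩; exact hja (by exact_mod_cast haj.symm)), add_zero]
        rfl
  · rw [if_neg hc]
    refine ⟨⟨hg, hrows⟩, ?_⟩
    intro j i hj hi
    rw [if_neg, add_zero]
    rintro ⟨rfl, rfl, hmv⟩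
    exact hc ⟨by positivity, by exact_mod_cast hj, by positivity, by exact_mod_cast hi,
      by simpa [PySem.List.pyGetD_natCast, mAt] using hmv⟩

-- per-source contribution of cell (y, x) to cell (j, i), exactly as bodyB's four pushes produce it
def ctr (map countermap : List (List Int)) (number : Int) (y x j i : Nat) : Int :=
  if mAt map y x = number + 1 then
    (if (y : Int) - 1 = (j : Int) ∧ (x : Int) = (i : Int) ∧ mAt map j i = number then mAt countermap y x else 0) +
    (if (y : Int) + 1 = (j : Int) ∧ (x : Int) = (i : Int) ∧ mAt map j i = number then mAt countermap y x else 0) +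
    (if (y : Int) = (j : Int) ∧ (x : Int) - 1 = (i : Int) ∧ mAt map j i = number then mAt countermap y x else 0) +
    (if (y : Int) = (j : Int) ∧ (x : Int) + 1 = (i : Int) ∧ mAt map j i = number then mAt countermap y x else 0)
  else 0

lemma bodyB_char (map : List (List Int)) (number : Int) (countermap : List (List Int))
    (H W : Nat) (y x : Nat) (g : List (List Int)) (hs : Shp g H W) :
    Shp (bodyB map number countermap (H : Int) (W : Int) (y : Int) g (x : Int)) H W ∧
    ∀ j i : Nat, j < H → i < W →
      mAt (bodyB map number countermap (H : Int) (W : Int) (y : Int) g (x : Int)) j i =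
        mAt g j i + ctr map countermap number y x j i := by
  unfold bodyB
  by_cases hq : PySem.List.pyGetD (PySem.List.pyGetD map (y : Int) []) (x : Int) 0 = number + 1
  · rw [if_pos hq]
    have hq' : mAt map y x = number + 1 := by
      simpa [PySem.List.pyGetD_natCast, mAt] using hq
    have hv : PySem.List.pyGetD (PySem.List.pyGetD countermap (y : Int) []) (x : Int) 0 =
        mAt countermap y x := by
      simp [PySem.List.pyGetD_natCast, mAt]
    simp only [List.foldl_cons, List.foldl_nil, hv]
    set v := mAt countermap y x with hvdef
    obtain ⟨s1, e1⟩ := addNbr_char map number H W v g hs ((y : Int) - 1) (x : Int)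
    obtain ⟨s2, e2⟩ := addNbr_char map number H W v _ s1 ((y : Int) + 1) (x : Int)
    obtain ⟨s3, e3⟩ := addNbr_char map number H W v _ s2 (y : Int) ((x : Int) - 1)
    obtain ⟨s4, e4⟩ := addNbr_char map number H W v _ s3 (y : Int) ((x : Int) + 1)
    refine ⟨s4, ?_⟩
    intro j i hj hi
    rw [e4 j i hj hi, e3 j i hj hi, e2 j i hj hi, e1 j i hj hi, ctr, if_pos hq']
    ring
  · rw [if_neg hq]
    refine ⟨hs, ?_⟩
    intro j i hj hi
    have hq' : ¬ mAt map y x = number + 1 := by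
      intro h; apply hq; simpa [PySem.List.pyGetD_natCast, mAt] using h
    rw [ctr, if_neg hq', add_zero]

-- inner x-fold: entries accumulate the row of contributions of source row y
lemma innerB_char (map : List (List Int)) (number : Int) (countermap : List (List Int))
    (H W : Nat) (y : Nat) : ∀ (n : Nat) (g : List (List Int)), Shp g H W →
    Shp ((List.range n).foldl
      (fun g x => bodyB map number countermap (H : Int) (W : Int) (y : Int) g ((x : Nat) : Int)) g) H W ∧
    ∀ j i : Nat, j < H → i < W →
      mAt ((List.range n).foldl
        (fun g x => bodyB map number countermap (H : Int) (W : Int) (y : Int) g ((x : Nat) : Int)) g) j i =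
        mAt g j i + ((List.range n).map (fun x => ctr map countermap number y x j i)).sum := by
  intro n
  induction n with
  | zero => intro g hs; exact ⟨by simpa using hs, fun j i _ _ => by simp⟩
  | succ n ih =>
    intro g hs
    obtain ⟨sh, e⟩ := ih g hs
    rw [List.range_succ]
    obtain ⟨sh', e'⟩ := bodyB_char map number countermap H W y n _ sh
    refine ⟨by simpa using sh', ?_⟩
    intro j i hj hi
    rw [List.foldl_append, List.foldl_cons, List.foldl_nil, e' j i hj hi, e j i hj hi,
      List.map_append, List.sum_append]
    simp [add_assoc]

-- outer y-fold: entries accumulate all contributions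
lemma outerB_char (map : List (List Int)) (number : Int) (countermap : List (List Int))
    (H W : Nat) : ∀ (n : Nat) (g : List (List Int)), Shp g H W →
    Shp ((List.range n).foldl
      (fun g y => (List.range W).foldl
        (fun g x => bodyB map number countermap (H : Int) (W : Int) ((y : Nat) : Int) g ((x : Nat) : Int)) g) g) H W ∧
    ∀ j i : Nat, j < H → i < W →
      mAt ((List.range n).foldl
        (fun g y => (List.range W).foldl
          (fun g x => bodyB map number countermap (H : Int) (W : Int) ((y : Nat) : Int) g ((x : Nat) : Int)) g) g) j i =
        mAt g j i + ((List.range n).map (fun y =>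
          ((List.range W).map (fun x => ctr map countermap number y x j i)).sum)).sum := by
  intro n
  induction n with
  | zero => intro g hs; exact ⟨by simpa using hs, fun j i _ _ => by simp⟩
  | succ n ih =>
    intro g hs
    obtain ⟨sh, e⟩ := ih g hs
    rw [List.range_succ]
    obtain ⟨sh', e'⟩ := innerB_char map number countermap H W n W _ sh
    refine ⟨by simpa using sh', ?_⟩
    intro j i hj hi
    rw [List.foldl_append, List.foldl_cons, List.foldl_nil, e' j i hj hi, e j i hj hi,
      List.map_append, List.sum_append]
    simp [add_assoc]

-- search_alt (number ≠ 9) as the Nat-indexed scatter double fold over the zero grid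
lemma searchalt_eq_fold (map : List (List Int)) (number : Int) (countermap : List (List Int))
    (h9 : number ≠ 9) :
    search_alt map number countermap =
      (List.range map.length).foldl
        (fun g y => (List.range (map.getD 0 []).length).foldl
          (fun g x => bodyB map number countermap (map.length : Int) ((map.getD 0 []).length : Int)
            ((y : Nat) : Int) g ((x : Nat) : Int)) g)
        ((List.range map.length).map (fun _ => List.replicate (map.getD 0 []).length (0 : Int))) := by
  unfold search_alt
  simp only [PySem.List.pyGetD_zero, Int.toNat_natCast]
  rw [if_neg h9]
  rw [PySem.List.pyRange_one, PySem.List.pyRange_one]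
  simp only [sub_zero, Int.toNat_natCast, zero_add, List.foldl_map, List.map_map,
    Function.comp_def]

-- bridge: a List.range-mapped sum is a Finset.range sum
lemma listsum_range (n : Nat) (f : Nat → Int) :
    ((List.range n).map f).sum = ∑ k ∈ Finset.range n, f k := by
  induction n with
  | zero => simp
  | succ n ih => rw [List.range_succ, List.map_append, List.sum_append, Finset.sum_range_succ, ih]; simp

-- a doubly-indexed point-mass sum
lemma sum2_point (H W a b : Nat) (P : Prop) [Decidable P] (v : Int) :
    (∑ y ∈ Finset.range H, ∑ x ∈ Finset.range W, (if y = a ∧ x = b ∧ P then v else 0)) =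
      if a < H ∧ b < W ∧ P then v else 0 := by
  by_cases hP : P
  · have h1 : ∀ y : Nat, (∑ x ∈ Finset.range W, (if y = a ∧ x = b ∧ P then v else 0)) =
        (if y = a then (if b < W then v else 0) else 0) := by
      intro y
      by_cases hy : y = a
      · subst hy
        rw [if_pos rfl]
        rw [Finset.sum_congr rfl (fun x _ => show (if y = y ∧ x = b ∧ P then v else 0) =
          (if x = b then v else 0) by simp [hP])]
        rw [Finset.sum_ite_eq' (Finset.range W) b (fun _ => v)]
        simp [Finset.mem_range]
      · rw [if_neg hy]
        exact Finset.sum_eq_zero (fun x _ => by simp [hy])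
    rw [Finset.sum_congr rfl (fun y _ => h1 y),
      Finset.sum_ite_eq' (Finset.range H) a (fun _ => if b < W then v else 0)]
    by_cases h : a < H <;> by_cases h2 : b < W <;> simp [h, h2, hP, Finset.mem_range]
  · simp [hP]

-- value of cell (j, x) as a getElem (for the 9-branch)
lemma mAt_eq_getElem (g : List (List Int)) (j x : Nat) (hj : j < g.length)
    (hx : x < (g[j]'hj).length) : mAt g j x = (g[j]'hj)[x]'hx := by
  unfold mAt
  rw [List.getD_eq_getElem _ _ hj, List.getD_eq_getElem _ _ hx]

-- A's neighbour sum rewritten over Nat indices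
lemma sumA_nat (map countermap : List (List Int)) (number : Int) (y x : Nat)
    (hrow : (map.getD y []).length = (map.getD 0 []).length) :
    sumA map countermap number (y : Int) (x : Int) =
      (if 0 < y ∧ mAt map (y - 1) x = number + 1 then mAt countermap (y - 1) x else 0) +
      (if y + 1 < map.length ∧ mAt map (y + 1) x = number + 1 then mAt countermap (y + 1) x else 0) +
      (if 0 < x ∧ mAt map y (x - 1) = number + 1 then mAt countermap y (x - 1) else 0) +
      (if x + 1 < (map.getD 0 []).length ∧ mAt map y (x + 1) = number + 1 then mAt countermap y (x + 1) else 0) := by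
  rw [sumA_gen]
  have e1 : (if 0 < (y : Int) ∧ PySem.List.pyGetD (PySem.List.pyGetD map ((y : Int) - 1) []) (x : Int) 0 = number + 1 then
       PySem.List.pyGetD (PySem.List.pyGetD countermap ((y : Int) - 1) []) (x : Int) 0 else 0) =
      (if 0 < y ∧ mAt map (y - 1) x = number + 1 then mAt countermap (y - 1) x else 0) := by
    rcases Nat.eq_zero_or_pos y with h | h
    · subst h; simp
    · have hc : ((y : Int) - 1) = (((y - 1 : Nat)) : Int) := by omega
      rw [hc]
      simp only [PySem.List.pyGetD_natCast, mAt]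
      exact if_congr (and_congr_left' (by omega)) rfl rfl
  have e2 : (if (y : Int) < (map.length : Int) - 1 ∧ PySem.List.pyGetD (PySem.List.pyGetD map ((y : Int) + 1) []) (x : Int) 0 = number + 1 then
       PySem.List.pyGetD (PySem.List.pyGetD countermap ((y : Int) + 1) []) (x : Int) 0 else 0) =
      (if y + 1 < map.length ∧ mAt map (y + 1) x = number + 1 then mAt countermap (y + 1) x else 0) := by
    have hc : ((y : Int) + 1) = (((y + 1 : Nat)) : Int) := by push_cast; ring
    rw [hc]
    simp only [PySem.List.pyGetD_natCast, mAt]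
    exact if_congr (and_congr_left' (by omega)) rfl rfl
  have e3 : (if 0 < (x : Int) ∧ PySem.List.pyGetD (PySem.List.pyGetD map (y : Int) []) ((x : Int) - 1) 0 = number + 1 then
       PySem.List.pyGetD (PySem.List.pyGetD countermap (y : Int) []) ((x : Int) - 1) 0 else 0) =
      (if 0 < x ∧ mAt map y (x - 1) = number + 1 then mAt countermap y (x - 1) else 0) := by
    rcases Nat.eq_zero_or_pos x with h | h
    · subst h; simp
    · have hc : ((x : Int) - 1) = (((x - 1 : Nat)) : Int) := by omega
      rw [hc]
      simp only [PySem.List.pyGetD_natCast, mAt]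
      exact if_congr (and_congr_left' (by omega)) rfl rfl
  have e4 : (if (x : Int) < ((PySem.List.pyGetD map (y : Int) []).length : Int) - 1 ∧ PySem.List.pyGetD (PySem.List.pyGetD map (y : Int) []) ((x : Int) + 1) 0 = number + 1 then
       PySem.List.pyGetD (PySem.List.pyGetD countermap (y : Int) []) ((x : Int) + 1) 0 else 0) =
      (if x + 1 < (map.getD 0 []).length ∧ mAt map y (x + 1) = number + 1 then mAt countermap y (x + 1) else 0) := by
    have hc : ((x : Int) + 1) = (((x + 1 : Nat)) : Int) := by push_cast; ring
    rw [hc]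
    simp only [PySem.List.pyGetD_natCast, mAt]
    rw [hrow]
    exact if_congr (and_congr_left' (by omega)) rfl rfl
  rw [e1, e2, e3, e4]

-- the contribution, rewritten as four Nat-indexed point masses at the source positions
lemma ctr_pt (map countermap : List (List Int)) (number : Int) (j i y x : Nat) :
    ctr map countermap number y x j i =
      (if y = j + 1 ∧ x = i ∧ (mAt map (j + 1) i = number + 1 ∧ mAt map j i = number) then mAt countermap (j + 1) i else 0) +
      (if y = j - 1 ∧ x = i ∧ (1 ≤ j ∧ mAt map (j - 1) i = number + 1 ∧ mAt map j i = number) then mAt countermap (j - 1) i else 0) +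
      (if y = j ∧ x = i + 1 ∧ (mAt map j (i + 1) = number + 1 ∧ mAt map j i = number) then mAt countermap j (i + 1) else 0) +
      (if y = j ∧ x = i - 1 ∧ (1 ≤ i ∧ mAt map j (i - 1) = number + 1 ∧ mAt map j i = number) then mAt countermap j (i - 1) else 0) := by
  unfold ctr
  by_cases hq : mAt map y x = number + 1
  · rw [if_pos hq]
    have e1 : (if (y : Int) - 1 = (j : Int) ∧ (x : Int) = (i : Int) ∧ mAt map j i = number then mAt countermap y x else 0) =
        (if y = j + 1 ∧ x = i ∧ (mAt map (j + 1) i = number + 1 ∧ mAt map j i = number) then mAt countermap (j + 1) i else 0) := by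
      by_cases hpt : y = j + 1 ∧ x = i
      · obtain ⟨h1, h2⟩ := hpt; subst h1; subst h2
        have hc : ((j + 1 : Nat) : Int) - 1 = (j : Int) := by push_cast; ring
        simp [hc, hq]
      · rw [if_neg (by rintro ⟨ha, hb, -⟩; exact hpt ⟨by omega, by omega⟩), if_neg (by tauto)]
    have e2 : (if (y : Int) + 1 = (j : Int) ∧ (x : Int) = (i : Int) ∧ mAt map j i = number then mAt countermap y x else 0) =
        (if y = j - 1 ∧ x = i ∧ (1 ≤ j ∧ mAt map (j - 1) i = number + 1 ∧ mAt map j i = number) then mAt countermap (j - 1) i else 0) := by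
      by_cases hpt : y = j - 1 ∧ x = i ∧ 1 ≤ j
      · obtain ⟨h1, h2, h3⟩ := hpt; subst h1; subst h2
        have hc : ((j - 1 : Nat) : Int) + 1 = (j : Int) := by omega
        simp [hc, hq, h3]
      · rw [if_neg (by rintro ⟨ha, hb, -⟩; exact hpt ⟨by omega, by omega, by omega⟩),
          if_neg (by rintro ⟨h1, h2, h3, -⟩; exact hpt ⟨h1, h2, h3⟩)]
    have e3 : (if (y : Int) = (j : Int) ∧ (x : Int) - 1 = (i : Int) ∧ mAt map j i = number then mAt countermap y x else 0) =
        (if y = j ∧ x = i + 1 ∧ (mAt map j (i + 1) = number + 1 ∧ mAt map j i = number) then mAt countermap j (i + 1) else 0) := by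
      by_cases hpt : y = j ∧ x = i + 1
      · obtain ⟨h1, h2⟩ := hpt; subst h1; subst h2
        have hc : ((i + 1 : Nat) : Int) - 1 = (i : Int) := by push_cast; ring
        simp [hc, hq]
      · rw [if_neg (by rintro ⟨ha, hb, -⟩; exact hpt ⟨by omega, by omega⟩), if_neg (by tauto)]
    have e4 : (if (y : Int) = (j : Int) ∧ (x : Int) + 1 = (i : Int) ∧ mAt map j i = number then mAt countermap y x else 0) =
        (if y = j ∧ x = i - 1 ∧ (1 ≤ i ∧ mAt map j (i - 1) = number + 1 ∧ mAt map j i = number) then mAt countermap j (i - 1) else 0) := by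
      by_cases hpt : y = j ∧ x = i - 1 ∧ 1 ≤ i
      · obtain ⟨h1, h2, h3⟩ := hpt; subst h1; subst h2
        have hc : ((i - 1 : Nat) : Int) + 1 = (i : Int) := by omega
        simp [hc, hq, h3]
      · rw [if_neg (by rintro ⟨ha, hb, -⟩; exact hpt ⟨by omega, by omega, by omega⟩),
          if_neg (by rintro ⟨h1, h2, h3, -⟩; exact hpt ⟨h1, h2, h3⟩)]
    rw [e1, e2, e3, e4]
  · rw [if_neg hq]
    have z1 : (if y = j + 1 ∧ x = i ∧ (mAt map (j + 1) i = number + 1 ∧ mAt map j i = number) then mAt countermap (j + 1) i else 0) = 0 := by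
      rw [if_neg]; rintro ⟨h1, h2, h3, -⟩; subst h1; subst h2; exact hq h3
    have z2 : (if y = j - 1 ∧ x = i ∧ (1 ≤ j ∧ mAt map (j - 1) i = number + 1 ∧ mAt map j i = number) then mAt countermap (j - 1) i else 0) = 0 := by
      rw [if_neg]; rintro ⟨h1, h2, -, h3, -⟩; subst h1; subst h2; exact hq h3
    have z3 : (if y = j ∧ x = i + 1 ∧ (mAt map j (i + 1) = number + 1 ∧ mAt map j i = number) then mAt countermap j (i + 1) else 0) = 0 := by
      rw [if_neg]; rintro ⟨h1, h2, h3, -⟩; subst h1; subst h2; exact hq h3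
    have z4 : (if y = j ∧ x = i - 1 ∧ (1 ≤ i ∧ mAt map j (i - 1) = number + 1 ∧ mAt map j i = number) then mAt countermap j (i - 1) else 0) = 0 := by
      rw [if_neg]; rintro ⟨h1, h2, -, h3, -⟩; subst h1; subst h2; exact hq h3
    rw [z1, z2, z3, z4]
    ring

-- all scattered contributions into cell (j, i) add up to A's gathered value there
lemma ctr_sum (map countermap : List (List Int)) (number : Int) (h9 : number ≠ 9)
    (j i : Nat) (hj : j < map.length) (hi : i < (map.getD 0 []).length)
    (hrow : (map.getD j []).length = (map.getD 0 []).length) :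
    ((List.range map.length).map (fun y =>
      ((List.range (map.getD 0 []).length).map (fun x => ctr map countermap number y x j i)).sum)).sum =
      cellA map number countermap j i := by
  rw [listsum_range]
  rw [Finset.sum_congr rfl (fun y _ => listsum_range (map.getD 0 []).length
    (fun x => ctr map countermap number y x j i))]
  rw [Finset.sum_congr rfl (fun y _ => Finset.sum_congr rfl
    (fun x _ => ctr_pt map countermap number j i y x))]
  simp only [Finset.sum_add_distrib]
  rw [sum2_point, sum2_point, sum2_point, sum2_point]
  by_cases hm : mAt map j i = number
  · rw [cellA, if_pos hm, if_neg h9, sumA_nat map countermap number j i hrow]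
    have f1 : (if j + 1 < map.length ∧ i < (map.getD 0 []).length ∧
          (mAt map (j + 1) i = number + 1 ∧ mAt map j i = number) then mAt countermap (j + 1) i else 0) =
        (if j + 1 < map.length ∧ mAt map (j + 1) i = number + 1 then mAt countermap (j + 1) i else 0) := by
      exact if_congr (by tauto) rfl rfl
    have f2 : (if j - 1 < map.length ∧ i < (map.getD 0 []).length ∧
          (1 ≤ j ∧ mAt map (j - 1) i = number + 1 ∧ mAt map j i = number) then mAt countermap (j - 1) i else 0) =
        (if 0 < j ∧ mAt map (j - 1) i = number + 1 then mAt countermap (j - 1) i else 0) := by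
      refine if_congr ?_ rfl rfl
      constructor
      · rintro ⟨-, -, h1, h2, -⟩; exact ⟨h1, h2⟩
      · rintro ⟨h1, h2⟩; exact ⟨by omega, hi, h1, h2, hm⟩
    have f3 : (if j < map.length ∧ i + 1 < (map.getD 0 []).length ∧
          (mAt map j (i + 1) = number + 1 ∧ mAt map j i = number) then mAt countermap j (i + 1) else 0) =
        (if i + 1 < (map.getD 0 []).length ∧ mAt map j (i + 1) = number + 1 then mAt countermap j (i + 1) else 0) := by
      exact if_congr (by tauto) rfl rfl
    have f4 : (if j < map.length ∧ i - 1 < (map.getD 0 []).length ∧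
          (1 ≤ i ∧ mAt map j (i - 1) = number + 1 ∧ mAt map j i = number) then mAt countermap j (i - 1) else 0) =
        (if 0 < i ∧ mAt map j (i - 1) = number + 1 then mAt countermap j (i - 1) else 0) := by
      refine if_congr ?_ rfl rfl
      constructor
      · rintro ⟨-, -, h1, h2, -⟩; exact ⟨h1, h2⟩
      · rintro ⟨h1, h2⟩; exact ⟨hj, by omega, h1, h2, hm⟩
    rw [f1, f2, f3, f4]
    ring
  · have g1 : ¬ (j + 1 < map.length ∧ i < (map.getD 0 []).length ∧
        (mAt map (j + 1) i = number + 1 ∧ mAt map j i = number)) := by tauto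
    have g2 : ¬ (j - 1 < map.length ∧ i < (map.getD 0 []).length ∧
        (1 ≤ j ∧ mAt map (j - 1) i = number + 1 ∧ mAt map j i = number)) := by tauto
    have g3 : ¬ (j < map.length ∧ i + 1 < (map.getD 0 []).length ∧
        (mAt map j (i + 1) = number + 1 ∧ mAt map j i = number)) := by tauto
    have g4 : ¬ (j < map.length ∧ i - 1 < (map.getD 0 []).length ∧
        (1 ≤ i ∧ mAt map j (i - 1) = number + 1 ∧ mAt map j i = number)) := by tauto
    rw [if_neg g1, if_neg g2, if_neg g3, if_neg g4, cellA, if_neg hm]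
    ring

-- the zero accumulator grid has shape H × W and zero entries
lemma new0_shape (H W : Nat) :
    Shp ((List.range H).map (fun _ => List.replicate W (0 : Int))) H W := by
  constructor
  · simp
  · intro r hr
    simp only [List.mem_map] at hr
    obtain ⟨a, -, rfl⟩ := hr
    simp

lemma new0_entry (H W j i : Nat) :
    mAt ((List.range H).map (fun _ => List.replicate W (0 : Int))) j i = 0 := by
  rw [mAt, getD_map_const]
  by_cases h : j < (List.range H).length
  · rw [if_pos h, getD_replicate0]
  · rw [if_neg h]; rfl

-- B's number = 9 branch
lemma search_alt_nine (map countermap : List (List Int)) :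
    search_alt map 9 countermap =
      map.map (fun row => row.map (fun v => if v = 9 then (1 : Int) else 0)) := by
  rw [search_alt]
  simp

-- the shape of B's result
lemma shapeB (map : List (List Int)) (number : Int) (countermap : List (List Int))
    (h9 : number ≠ 9) :
    Shp (search_alt map number countermap) map.length (map.getD 0 []).length := by
  rw [searchalt_eq_fold map number countermap h9]
  exact (outerB_char map number countermap map.length (map.getD 0 []).length map.length _
    (new0_shape _ _)).1

lemma lenB (map : List (List Int)) (number : Int) (countermap : List (List Int))
    (hp : Pre_search map number countermap) :
    (search_alt map number countermap).length = map.length := by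
  by_cases h9 : number = 9
  · rw [h9, search_alt_nine]
    simp
  · exact (shapeB map number countermap h9).1

lemma rowlenB (map : List (List Int)) (number : Int) (countermap : List (List Int))
    (hp : Pre_search map number countermap) (y : Nat) (hy : y < map.length) :
    ((search_alt map number countermap).getD y []).length = (map.getD 0 []).length := by
  by_cases h9 : number = 9
  · rw [h9, search_alt_nine]
    have hy1 : y < (map.map (fun row => row.map (fun v => if v = 9 then (1 : Int) else 0))).length := by
      simpa using hy
    rw [List.getD_eq_getElem _ _ hy1, List.getElem_map, List.length_map]
    exact hp.2.1 _ (List.getElem_mem hy)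
  · obtain ⟨hl, hr⟩ := shapeB map number countermap h9
    have hy1 : y < (search_alt map number countermap).length := by omega
    rw [List.getD_eq_getElem _ _ hy1]
    exact hr _ (List.getElem_mem hy1)

lemma entryB (map : List (List Int)) (number : Int) (countermap : List (List Int))
    (hp : Pre_search map number countermap) (y x : Nat) (hy : y < map.length)
    (hx : x < (map.getD 0 []).length) :
    ((search_alt map number countermap).getD y []).getD x 0 = cellA map number countermap y x := by
  have hrow : (map.getD y []).length = (map.getD 0 []).length := by
    apply hp.2.1
    rw [List.getD_eq_getElem _ _ hy]
    exact List.getElem_mem hy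
  by_cases h9 : number = 9
  · subst h9
    rw [search_alt_nine]
    have hy1 : y < (map.map (fun row => row.map (fun v => if v = 9 then (1 : Int) else 0))).length := by
      simpa using hy
    have hxm : x < (map[y]'hy).length := by
      rw [← List.getD_eq_getElem _ _ hy, hrow]; exact hx
    rw [List.getD_eq_getElem _ _ hy1, List.getElem_map]
    have hx1 : x < ((map[y]'hy).map (fun v => if v = 9 then (1 : Int) else 0)).length := by
      rw [List.length_map]; exact hxm
    rw [List.getD_eq_getElem _ _ hx1, List.getElem_map]
    rw [← mAt_eq_getElem map y x hy hxm, cellA]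
    by_cases hm : mAt map y x = 9
    · rw [if_pos hm, if_pos hm, if_pos rfl]
    · rw [if_neg hm, if_neg hm]
  · have hchar := outerB_char map number countermap map.length (map.getD 0 []).length map.length
      ((List.range map.length).map (fun _ => List.replicate (map.getD 0 []).length (0 : Int)))
      (new0_shape _ _)
    have := hchar.2 y x hy hx
    rw [searchalt_eq_fold map number countermap h9]
    show mAt _ y x = cellA map number countermap y x
    rw [this, new0_entry, zero_add]
    exact ctr_sum map countermap number h9 y x hy hx hrow

-- ===== VERDICT (by name: the statement is the Claim_ definition above) =====
theorem search_spec : Claim_equal_search := by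
  intro map number countermap _hd hp
  unfold Spec_search
  apply List.ext_getElem
  · rw [lenA, lenB map number countermap hp]
  · intro y hy1 hy2
    have hy : y < map.length := by rw [lenA] at hy1; exact hy1
    apply List.ext_getElem
    · rw [← List.getD_eq_getElem _ _ hy1, ← List.getD_eq_getElem _ _ hy2,
        rowlenA, rowlenB map number countermap hp y hy, if_pos hy]
    · intro x hx1 hx2
      have hx : x < (map.getD 0 []).length := by
        have h := hx1
        rw [← List.getD_eq_getElem _ _ hy1] at h
        rw [rowlenA, if_pos hy] at h
        exact h
      have eA : ((search map number countermap)[y]'hy1)[x]'hx1 =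
          ((search map number countermap).getD y []).getD x 0 := by
        rw [List.getD_eq_getElem _ _ hy1, List.getD_eq_getElem _ _ hx1]
      have eB : ((search_alt map number countermap)[y]'hy2)[x]'hx2 =
          ((search_alt map number countermap).getD y []).getD x 0 := by
        rw [List.getD_eq_getElem _ _ hy2, List.getD_eq_getElem _ _ hx2]
      rw [eA, eB, entryA map number countermap hp y x hy hx,
        entryB map number countermap hp y x hy hx]
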